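-- pv_equiv track=rewrite | github.com/RyanPlanteNJ/Graphs | codegca.py | isSubMatrixFull
-- ===== SOURCE A (Python) =====
-- def getCol(mat, col):
--     return [mat[i][col] for i in range(3)]
--
-- def isSubMatrixFull(mat):
--     n = len(mat[0])
--     ans = [False]*(n-2)
--     kernel = getCol(mat, 0) + getCol(mat, 1) + getCol(mat, 2) # O(1)
--     for i in range(n - 2): # O(n)
--         if len(set(kernel)) == 9: # O(1)
--             ans[i] = True # O(1)
--         if i < n - 3: # O(1)
--             kernel = kernel[3:] + getCol(mat, i + 3) # O(1)
--     return ans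
-- ===== SOURCE B (Python) =====
-- def isSubMatrixFull(mat):
--     n = len(mat[0])
--     # flatten column-major; a duplicate inside a 3x3 window is always within
--     # distance 8 in this sequence, so prev[p] = nearest earlier equal index
--     # (or -1) needs only a bounded backward look; window i is full iff no
--     # position in seq[3i:3i+9] has its nearest duplicate inside the window.
--     seq = [mat[r][c] for c in range(n) for r in range(3)]
--     prev = []
--     for p in range(3 * n):
--         cands = [q for q in range(max(p - 8, 0), p) if seq[q] == seq[p]]
--         prev.append(cands[-1] if cands else -1)
--     return [max(prev[3 * i:3 * i + 9]) < 3 * i for i in range(n - 2)]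
-- ===== Notes on version B (the rewrite author's own statement) =====
-- stated objective: alternative
-- what changed: B replaces A's rolling 9-element kernel and per-window set-cardinality test with a nearest-previous-duplicate algorithm: it flattens the matrix column-major, computes for every position the nearest earlier equal index within distance 8 (none can matter farther away), and marks window i full iff the maximum of those indices over seq[3i:3i+9] falls before 3i.
import Mathlib
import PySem

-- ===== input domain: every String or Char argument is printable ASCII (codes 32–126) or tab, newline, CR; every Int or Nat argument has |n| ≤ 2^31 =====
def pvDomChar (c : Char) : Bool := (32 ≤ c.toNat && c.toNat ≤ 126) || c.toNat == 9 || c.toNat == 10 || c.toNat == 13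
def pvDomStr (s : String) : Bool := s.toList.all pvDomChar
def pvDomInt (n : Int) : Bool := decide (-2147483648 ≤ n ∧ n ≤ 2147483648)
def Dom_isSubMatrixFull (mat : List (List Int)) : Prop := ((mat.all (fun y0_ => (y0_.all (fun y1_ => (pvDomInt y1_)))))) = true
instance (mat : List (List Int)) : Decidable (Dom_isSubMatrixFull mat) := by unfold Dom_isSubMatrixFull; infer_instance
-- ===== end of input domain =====

-- B replaces A's rolling kernel and per-window set test with a nearest-previous-duplicate
-- scan over the column-major flattening (objective: alternative).

-- shared primitive: mat[r][c] via PySem indexing (total; defaults only reached outside Pre_)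
def pvCell (mat : List (List Int)) (r c : Int) : Int :=
  (PySem.List.pyGet? ((PySem.List.pyGet? mat r).getD []) c).getD 0

-- ===== PORT A =====
def getCol (mat : List (List Int)) (col : Int) : List Int :=
  (PySem.List.pyRange 0 3 1).map (fun i => pvCell mat i col)

def isSubMatrixFull (mat : List (List Int)) : List Bool :=
  let n : Int := ((PySem.List.pyGet? mat 0).getD []).length
  let ans : List Bool := List.replicate (n - 2).toNat false
  let kernel : List Int := getCol mat 0 ++ getCol mat 1 ++ getCol mat 2
  ((PySem.List.pyRange 0 (n - 2) 1).foldl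
    (fun (st : List Bool × List Int) i =>
      let ans' := if (PySem.Set.ofList st.2).length = 9 then st.1.set i.toNat true else st.1
      let kernel' := if i < n - 3 then PySem.List.slice st.2 (some 3) none ++ getCol mat (i + 3) else st.2
      (ans', kernel'))
    (ans, kernel)).1

-- ===== PORT B =====
-- seq = [mat[r][c] for c in range(n) for r in range(3)]; prev[p] = nearest earlier
-- index (within 8, all that can matter) holding seq[p], else -1 ('cands[-1] if cands
-- else -1' is getLast?.getD (-1)); window i full iff max(prev[3i:3i+9]) < 3i
-- (max of a 9-element slice; the .getD default is unreachable inside Pre_).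
def isSubMatrixFull_alt (mat : List (List Int)) : List Bool :=
  let n : Int := ((PySem.List.pyGet? mat 0).getD []).length
  let seq : List Int := (PySem.List.pyRange 0 n 1).flatMap (fun c =>
    (PySem.List.pyRange 0 3 1).map (fun r => pvCell mat r c))
  let prev : List Int := (PySem.List.pyRange 0 (3 * n) 1).foldl (fun acc p =>
    let cands := (PySem.List.pyRange (max (p - 8) 0) p 1).filter
      (fun q => PySem.List.pyGetD seq q 0 == PySem.List.pyGetD seq p 0)
    acc ++ [(PySem.List.pyGet? cands (-1)).getD (-1)]) []
  (PySem.List.pyRange 0 (n - 2) 1).map (fun i =>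
    decide (((PySem.List.max? (PySem.List.slice prev (some (3 * i)) (some (3 * i + 9)))
      (fun x => x)).getD (-1)) < 3 * i))

-- ===== PRECONDITION & SPEC =====
-- Pre_: exactly where the Python A returns: at least 3 rows, first row at least 3 wide,
-- rows 1 and 2 at least as wide as row 0 (all columns 0..n-1 of rows 0..2 are read).
def Pre_isSubMatrixFull (mat : List (List Int)) : Prop :=
  3 ≤ mat.length ∧ 3 ≤ (mat.getD 0 []).length ∧
    (mat.getD 0 []).length ≤ (mat.getD 1 []).length ∧
    (mat.getD 0 []).length ≤ (mat.getD 2 []).length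
instance (mat : List (List Int)) : Decidable (Pre_isSubMatrixFull mat) := by
  unfold Pre_isSubMatrixFull; infer_instance
def pvWitness_isSubMatrixFull : List (List Int) := [[1, 2, 3], [4, 5, 6], [7, 8, 9]]

def Spec_isSubMatrixFull (mat : List (List Int)) (out : List Bool) : Prop := out = isSubMatrixFull_alt mat
instance (mat : List (List Int)) (out : List Bool) : Decidable (Spec_isSubMatrixFull mat out) := by unfold Spec_isSubMatrixFull; infer_instance

-- ===== CLAIM (what is proved, stated in full; the proofs are below) =====
def Claim_equal_isSubMatrixFull : Prop := ∀ (mat : List (List Int)), Dom_isSubMatrixFull mat → Pre_isSubMatrixFull mat → Spec_isSubMatrixFull mat (isSubMatrixFull mat)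

-- ===== LEMMAS AND PROOFS =====

-- the 3x3 window at column i, column-major (A's kernel at step i)
def pvWin (mat : List (List Int)) (i : Int) : List Int :=
  getCol mat i ++ getCol mat (i + 1) ++ getCol mat (i + 2)

def pvFull (mat : List (List Int)) (i : Int) : Bool :=
  decide ((PySem.Set.ofList (pvWin mat i)).length = 9)

def pvStep (mat : List (List Int)) (n : Int) (st : List Bool × List Int) (i : Int) :
    List Bool × List Int :=
  (if (PySem.Set.ofList st.2).length = 9 then st.1.set i.toNat true else st.1,
   if i < n - 3 then PySem.List.slice st.2 (some 3) none ++ getCol mat (i + 3) else st.2)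

theorem pvLength_getCol (mat : List (List Int)) (c : Int) : (getCol mat c).length = 3 := by
  simp [getCol, PySem.List.length_pyRange_one]
theorem pvDrop3_win (mat : List (List Int)) (i : Int) :
    PySem.List.slice (pvWin mat i) (some 3) none = getCol mat (i + 1) ++ getCol mat (i + 2) := by
  rw [PySem.List.slice_from _ (by norm_num)]
  show (pvWin mat i).drop 3 = _
  unfold pvWin
  rw [List.append_assoc,
      show (3 : Nat) = (getCol mat i).length from (pvLength_getCol mat i).symm,
      List.drop_left]
theorem pvSet_mid (pre suf : List Bool) (b : Bool) :
    (pre ++ false :: suf).set pre.length b = pre ++ b :: suf := by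
  induction pre with
  | nil => simp
  | cons x xs ih => simp [ih]
theorem pvLoop (mat : List (List Int)) (n : Int) (m : Nat) (hm : (m : Int) = n - 2) :
    ∀ j : Nat, j ≤ m →
      (List.range j).foldl (fun st (k : Nat) => pvStep mat n st (k : Int))
          (List.replicate m false, pvWin mat 0)
        = ((List.range j).map (fun (k : Nat) => pvFull mat (k : Int))
             ++ List.replicate (m - j) false,
           pvWin mat ((min j (m - 1) : Nat) : Int)) := by
  intro j hj
  induction j with
  | zero => simp
  | succ j ih =>
    have hjm : j < m := hj
    rw [List.range_succ, List.foldl_append, ih (Nat.le_of_lt hjm)]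
    have hmin : min j (m - 1) = j := by omega
    rw [hmin]
    simp only [List.foldl_cons, List.foldl_nil, pvStep, List.map_append, List.map_cons,
      List.map_nil]
    have hrep : List.replicate (m - j) false = false :: List.replicate (m - j - 1) false := by
      rw [← List.replicate_succ]; congr 1; omega
    have hm1 : m - (j + 1) = m - j - 1 := by omega
    refine Prod.ext ?_ ?_
    · simp only [hrep, hm1]
      by_cases hfull : (PySem.Set.ofList (pvWin mat (j : Int))).length = 9
      · rw [if_pos hfull]
        have hfj : pvFull mat (j : Int) = true := by simp [pvFull, hfull]
        show ((List.range j).map (fun (k : Nat) => pvFull mat (k : Int))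
            ++ false :: List.replicate (m - j - 1) false).set ((j : Int)).toNat true = _
        rw [show ((j : Int)).toNat
              = ((List.range j).map (fun (k : Nat) => pvFull mat (k : Int))).length by simp]
        rw [pvSet_mid]
        simp [hfj]
      · rw [if_neg hfull]
        have hfj : pvFull mat (j : Int) = false := by
          simp only [pvFull]; exact decide_eq_false hfull
        simp [hfj]
    · by_cases hlast : (j : Int) < n - 3
      · rw [if_pos hlast, pvDrop3_win]
        have hj1 : min (j + 1) (m - 1) = j + 1 := by omega
        rw [hj1]
        show _ = pvWin mat ((j : Int) + 1)
        unfold pvWin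
        rw [List.append_assoc, List.append_assoc]
        congr 2
      · rw [if_neg hlast]
        have heq : min (j + 1) (m - 1) = j := by omega
        rw [heq]
theorem pvCore (mat : List (List Int)) (n : Int) :
    ((PySem.List.pyRange 0 (n - 2) 1).foldl (pvStep mat n)
        (List.replicate (n - 2).toNat false, pvWin mat 0)).1
      = (List.range (n - 2).toNat).map (fun (k : Nat) => pvFull mat (k : Int)) := by
  by_cases h2 : 2 ≤ n
  · have hm : (((n - 2).toNat : Nat) : Int) = n - 2 := by omega
    have hr : PySem.List.pyRange 0 (n - 2) 1
        = (List.range (n - 2).toNat).map (fun (k : Nat) => (k : Int)) := by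
      rw [PySem.List.pyRange_one]
      simp
    rw [hr, List.foldl_map, pvLoop mat n (n - 2).toNat hm (n - 2).toNat (le_refl _)]
    simp
  · have hnil : PySem.List.pyRange 0 (n - 2) 1 = [] :=
      PySem.List.pyRange_one_eq_nil (by omega)
    have hm0 : (n - 2).toNat = 0 := by omega
    rw [hnil, hm0]
    simp

theorem pvA_eq (mat : List (List Int)) : isSubMatrixFull mat =
    (List.range ((((PySem.List.pyGet? mat 0).getD []).length : Int) - 2).toNat).map
      (fun (k : Nat) => pvFull mat (k : Int)) :=
  pvCore mat (((PySem.List.pyGet? mat 0).getD []).length : Int)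

theorem pvGetCol_eq (mat : List (List Int)) (c : Int) :
    getCol mat c = [pvCell mat 0 c, pvCell mat 1 c, pvCell mat 2 c] := by
  rfl

-- ---- B-side reasoning ----

-- the column-major flattening as a function of the flat position
def pvG (mat : List (List Int)) (p : Nat) : Int :=
  pvCell mat ((p % 3 : Nat) : Int) ((p / 3 : Nat) : Int)

-- the value B's loop stores at flat position p (nearest earlier equal index, else -1)
def pvP (mat : List (List Int)) (p : Int) : Int :=
  (((PySem.List.pyRange (max (p - 8) 0) p 1).filter
      (fun q => pvG mat q.toNat == pvG mat p.toNat)).getLast?).getD (-1)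

theorem pvG_spec (mat : List (List Int)) (c r : Nat) (hr : r < 3) :
    pvG mat (3 * c + r) = pvCell mat (r : Int) (c : Int) := by
  have h1 : (3 * c + r) % 3 = r := by omega
  have h2 : (3 * c + r) / 3 = c := by omega
  rw [pvG, h1, h2]

theorem pvBlock_eq (mat : List (List Int)) (c : Nat) :
    (PySem.List.pyRange 0 3 1).map (fun r => pvCell mat r (c : Int))
    = [pvG mat (3 * c), pvG mat (3 * c + 1), pvG mat (3 * c + 2)] := by
  have h0 := pvG_spec mat c 0 (by omega)
  have h1 := pvG_spec mat c 1 (by omega)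
  have h2 := pvG_spec mat c 2 (by omega)
  simp only [Nat.add_zero] at h0
  show [pvCell mat 0 (c : Int), pvCell mat 1 (c : Int), pvCell mat 2 (c : Int)] = _
  rw [h0, h1, h2]
  norm_num

theorem pvSeq_eq (mat : List (List Int)) (m : Nat) :
    (PySem.List.pyRange 0 (m : Int) 1).flatMap (fun c =>
      (PySem.List.pyRange 0 3 1).map (fun r => pvCell mat r c))
    = (List.range (3 * m)).map (pvG mat) := by
  rw [PySem.List.pyRange_zero_nat m, List.flatMap_map]
  induction m with
  | zero => simp
  | succ m ih =>
    have h3 : 3 * (m + 1) = (3 * m + 1 + 1) + 1 := by omega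
    rw [List.range_succ, List.flatMap_append, ih, h3, List.range_succ, List.range_succ,
      List.range_succ]
    simp only [List.map_append, List.map_cons, List.map_nil, List.flatMap_cons,
      List.flatMap_nil, List.append_nil, List.append_assoc]
    congr 1
    rw [pvBlock_eq mat m]
    norm_num

theorem pvPairwise_le_getLast (l : List Int) (hl : l.Pairwise (· < ·)) :
    ∀ x ∈ l, x ≤ (l.getLast?).getD (-1) := by
  induction l with
  | nil => intro x hx; cases hx
  | cons a t ih =>
    intro x hx
    cases t with
    | nil =>
      simp only [List.mem_singleton] at hx
      simp [hx]
    | cons b t' =>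
      have hne : (b :: t') ≠ [] := by simp
      rw [List.getLast?_cons_cons]
      rcases List.mem_cons.mp hx with rfl | hx'
      · rw [List.getLast?_eq_some_getLast hne]
        exact le_of_lt ((List.pairwise_cons.mp hl).1 _ (List.getLast_mem hne))
      · exact ih (List.pairwise_cons.mp hl).2 x hx' 

-- characterisation of prev[p] against a window start 3k
theorem pvP_lt_iff (mat : List (List Int)) (k : Nat) (p : Int)
    (hlo : 3 * (k : Int) ≤ p) (hhi : p < 3 * (k : Int) + 9) :
    pvP mat p < 3 * (k : Int) ↔
      ∀ q : Int, 3 * (k : Int) ≤ q → q < p → pvG mat q.toNat ≠ pvG mat p.toNat := by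
  have hT0 : (0 : Int) ≤ 3 * (k : Int) := by positivity
  set L := (PySem.List.pyRange (max (p - 8) 0) p 1).filter
      (fun q => pvG mat q.toNat == pvG mat p.toNat) with hL
  have hsorted : L.Pairwise (· < ·) :=
    (PySem.List.pairwise_lt_pyRange_one _ _).filter _
  have hmem : ∀ x : Int, x ∈ L ↔ (max (p - 8) 0 ≤ x ∧ x < p) ∧
      pvG mat x.toNat = pvG mat p.toNat := by
    intro x
    simp [hL, List.mem_filter, PySem.List.mem_pyRange_one]
  have hpvP : pvP mat p = (L.getLast?).getD (-1) := rfl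
  constructor
  · intro h q hq1 hq2 heq
    have hqL : q ∈ L := (hmem q).mpr ⟨⟨by omega, hq2⟩, heq⟩
    have := pvPairwise_le_getLast L hsorted q hqL
    rw [← hpvP] at this
    omega
  · intro h
    rw [hpvP]
    cases hlast : L.getLast? with
    | none => simp; omega
    | some y =>
      have hyL : y ∈ L := List.mem_of_getLast? hlast
      obtain ⟨⟨hy1, hy2⟩, hyeq⟩ := (hmem y).mp hyL
      simp only [Option.getD_some]
      by_contra hge
      exact h y (by omega) hy2 hyeq

-- set-cardinality = length iff nodup
theorem pvOfList_len_iff (xs : List Int) :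
    (PySem.Set.ofList xs).length = xs.length ↔ xs.Nodup := by
  constructor
  · intro h
    have hperm : (PySem.Set.ofList xs).Perm xs.dedup :=
      (List.perm_ext_iff_of_nodup (PySem.Set.nodup_ofList xs) xs.nodup_dedup).mpr
        (fun a => by rw [PySem.Set.mem_ofList, List.mem_dedup])
    have hlen : xs.dedup.length = xs.length := by rw [← hperm.length_eq, h]
    have hed : xs.dedup = xs := (List.dedup_sublist xs).eq_of_length hlen
    rw [← hed]
    exact xs.nodup_dedup
  · intro h
    rw [PySem.Set.ofList_eq_self_of_nodup xs h]

-- the window as a map over range'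
theorem pvWin_eq (mat : List (List Int)) (k : Nat) :
    pvWin mat (k : Int) = (List.range' (3 * k) 9).map (pvG mat) := by
  have hr : List.range' (3 * k) 9
      = [3 * k, 3 * k + 1, 3 * k + 2, 3 * (k + 1), 3 * (k + 1) + 1, 3 * (k + 1) + 2,
         3 * (k + 2), 3 * (k + 2) + 1, 3 * (k + 2) + 2] := by
    simp [List.range'_succ]
    omega
  have h1 : (k : Int) + 1 = ((k + 1 : Nat) : Int) := by push_cast; ring
  have h2 : (k : Int) + 2 = ((k + 2 : Nat) : Int) := by push_cast; ring
  rw [hr, pvWin, pvGetCol_eq, h1, h2, pvGetCol_eq, pvGetCol_eq]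
  simp only [List.map_cons, List.map_nil]
  have e : ∀ c r : Nat, r < 3 → pvG mat (3 * c + r) = pvCell mat ((r : Nat) : Int) ((c : Nat) : Int) :=
    fun c r hr => pvG_spec mat c r hr
  have e0 := e k 0 (by omega); have e1 := e k 1 (by omega); have e2 := e k 2 (by omega)
  have e3 := e (k + 1) 0 (by omega); have e4 := e (k + 1) 1 (by omega)
  have e5 := e (k + 1) 2 (by omega); have e6 := e (k + 2) 0 (by omega)
  have e7 := e (k + 2) 1 (by omega); have e8 := e (k + 2) 2 (by omega)
  simp only [Nat.add_zero, Nat.cast_zero, Nat.cast_one, Nat.cast_ofNat] at e0 e1 e2 e3 e4 e5 e6 e7 e8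
  rw [e0, e1, e2, e3, e4, e5, e6, e7, e8]
  rfl

-- the per-index equivalence
theorem pvKey (mat : List (List Int)) (k : Nat) :
    pvFull mat (k : Int)
      = decide (((PySem.List.max? ((List.range' (3 * k) 9).map
            (fun j => pvP mat ((j : Nat) : Int))) (fun x => x)).getD (-1)) < 3 * (k : Int)) := by
  have hA : ((PySem.Set.ofList (pvWin mat (k : Int))).length = 9) ↔
      (∀ i j : Nat, i < 9 → j < 9 → i < j → pvG mat (3 * k + i) ≠ pvG mat (3 * k + j)) := by
    rw [pvWin_eq]
    have hlen : ((List.range' (3 * k) 9).map (pvG mat)).length = 9 := by simp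
    have h9 := pvOfList_len_iff ((List.range' (3 * k) 9).map (pvG mat))
    rw [hlen] at h9
    rw [h9]
    change List.Pairwise (fun a b => a ≠ b) _ ↔ _
    rw [List.pairwise_map, List.pairwise_iff_getElem]
    constructor
    · intro h i j hi hj hij
      have := h i j (by simpa using hi) (by simpa using hj) hij
      simpa [List.getElem_range'] using this
    · intro h i j hi hj hij
      have hi9 : i < 9 := by simpa using hi
      have hj9 : j < 9 := by simpa using hj
      simpa [List.getElem_range'] using h i j hi9 hj9 hij
  unfold pvFull
  rw [decide_eq_decide, hA]
  cases hmax : PySem.List.max? ((List.range' (3 * k) 9).map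
      (fun j => pvP mat ((j : Nat) : Int))) (fun x => x) with
  | none =>
    exact absurd ((PySem.List.max?_eq_none_iff _ _).mp hmax) (by simp)
  | some M =>
    simp only [Option.getD_some]
    have hMmem := PySem.List.max?_mem hmax
    have hMmax := PySem.List.max?_isMax hmax
    have hiff2 : M < 3 * (k : Int) ↔
        ∀ j : Nat, 3 * k ≤ j → j < 3 * k + 9 → pvP mat ((j : Nat) : Int) < 3 * (k : Int) := by
      constructor
      · intro h j h1 h2
        have hjmem : pvP mat ((j : Nat) : Int) ∈ (List.range' (3 * k) 9).map
            (fun j => pvP mat ((j : Nat) : Int)) :=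
          List.mem_map_of_mem (List.mem_range'_1.mpr ⟨h1, h2⟩)
        exact lt_of_le_of_lt (hMmax _ hjmem) h
      · intro h
        rcases List.mem_map.mp hMmem with ⟨j, hjmem, rfl⟩
        rw [List.mem_range'_1] at hjmem
        exact h j hjmem.1 hjmem.2
    rw [hiff2]
    constructor
    · intro hA' j h1 h2
      refine (pvP_lt_iff mat k (j : Int) (by omega) (by omega)).mpr ?_
      intro q hq1 hq2 heq
      have := hA' (q.toNat - 3 * k) (j - 3 * k) (by omega) (by omega) (by omega)
      rw [show 3 * k + (q.toNat - 3 * k) = q.toNat from by omega,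
          show 3 * k + (j - 3 * k) = j from by omega] at this
      exact this (by simpa using heq)
    · intro h i j hi hj hij
      have hp := (pvP_lt_iff mat k ((3 * k + j : Nat) : Int) (by push_cast; omega)
          (by push_cast; omega)).mp (h (3 * k + j) (by omega) (by omega))
      have := hp ((3 * k + i : Nat) : Int) (by push_cast; omega) (by push_cast; omega)
      simpa using this

theorem pvB_eq (mat : List (List Int)) (hpre : Pre_isSubMatrixFull mat) :
    isSubMatrixFull_alt mat =
    (List.range ((((PySem.List.pyGet? mat 0).getD []).length : Int) - 2).toNat).map
      (fun (k : Nat) => pvFull mat (k : Int)) := by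
  have hm3 : 3 ≤ ((PySem.List.pyGet? mat 0).getD []).length := by
    have h := hpre.2.1
    cases mat with
    | nil => simp at h
    | cons a t => simpa [PySem.List.pyGet?, PySem.List.pyIdx?] using h
  simp only [isSubMatrixFull_alt]
  set m := ((PySem.List.pyGet? mat 0).getD []).length with hm
  rw [pvSeq_eq mat m]
  rw [PySem.List.foldl_append_singleton_eq_map]
  have hget : ∀ q : Int, 0 ≤ q → q < 3 * (m : Int) →
      PySem.List.pyGetD ((List.range (3 * m)).map (pvG mat)) q 0 = pvG mat q.toNat := by
    intro q h0 h1
    rw [PySem.List.pyGetD_eq_getElem _ _ h0 (by simp; omega)]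
    simp
  have hmapP : (PySem.List.pyRange 0 (3 * (m : Int)) 1).map (fun p =>
      (PySem.List.pyGet? ((PySem.List.pyRange (max (p - 8) 0) p 1).filter
        (fun q => PySem.List.pyGetD ((List.range (3 * m)).map (pvG mat)) q 0 ==
          PySem.List.pyGetD ((List.range (3 * m)).map (pvG mat)) p 0)) (-1)).getD (-1))
      = (PySem.List.pyRange 0 (3 * (m : Int)) 1).map (pvP mat) := by
    apply List.map_congr_left
    intro p hp
    rw [PySem.List.mem_pyRange_one] at hp
    rw [PySem.List.pyGet?_neg_one, pvP]
    congr 1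
    congr 1
    apply List.filter_congr
    intro q hq
    rw [PySem.List.mem_pyRange_one] at hq
    have hq0 : 0 ≤ q := le_trans (le_max_right _ _) hq.1
    rw [hget q hq0 (lt_trans hq.2 hp.2), hget p (le_trans hq0 (le_of_lt hq.2)) hp.2]
  rw [List.nil_append, hmapP]
  have hprevmap : (PySem.List.pyRange 0 (3 * (m : Int)) 1).map (pvP mat)
      = (List.range (3 * m)).map (fun j : Nat => pvP mat (j : Int)) := by
    rw [show (3 * (m : Int)) = ((3 * m : Nat) : Int) from by push_cast; ring,
      PySem.List.pyRange_zero_nat, List.map_map]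
    rfl
  rw [hprevmap]
  have hr2 : PySem.List.pyRange 0 ((m : Int) - 2) 1
      = (List.range ((m : Int) - 2).toNat).map (fun k : Nat => (k : Int)) := by
    rw [PySem.List.pyRange_one]
    simp
  rw [hr2, List.map_map]
  apply List.map_congr_left
  intro k hk
  rw [List.mem_range] at hk
  have hkm : k < m - 2 := by omega
  simp only [Function.comp]
  have hc1 : 3 * (k : Int) = ((3 * k : Nat) : Int) := by push_cast; ring
  have hc2 : 3 * (k : Int) + 9 = ((3 * k + 9 : Nat) : Int) := by push_cast; ring
  rw [hc2, hc1, PySem.List.slice_natCast, show (3 * k + 9) - (3 * k) = 9 from by omega,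
    ← List.map_drop, List.range_eq_range', List.drop_range',
    show (0 + 3 * k * 1) = 3 * k from by ring, ← List.map_take]
  have htake : (List.range' (3 * k) (3 * m - 3 * k)).take 9 = List.range' (3 * k) 9 := by
    rw [List.range'_eq_map_range, List.range'_eq_map_range, ← List.map_take, List.take_range,
      show min 9 (3 * m - 3 * k) = 9 from by omega]
  rw [htake, ← hc1]
  exact (pvKey mat k).symm

-- ===== VERDICT (by name: the statement is the Claim_ definition above) =====
theorem isSubMatrixFull_spec : Claim_equal_isSubMatrixFull := by
  intro mat _ hpre
  unfold Spec_isSubMatrixFull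
  rw [pvA_eq, pvB_eq mat hpre]
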